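-- pv_equiv track=rewrite | github.com/Jeanvr/supplier-scrapi | src/core/pdf_tools/pdf_operations.py | build_final_pages
-- ===== SOURCE A (Python) =====
-- def build_final_pages(reference_block: list[int], visual_page: int | None) -> list[int]:
--     """Construye la lista final de páginas a incluir.
--
--     Si hay página visual, va primero. Luego el bloque de referencia.
--     Máximo 3 páginas.
--
--     Args:
--         reference_block: Bloque de páginas donde aparece la referencia.
--         visual_page: Página visual opcional (portada/índice).
--
--     Returns:
--         Lista ordenada de páginas finales (máx 3).
--     """
--     final_pages: list[int] = []
--     if visual_page is not None:
--         final_pages.append(visual_page)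
--
--     for page in reference_block:
--         if page not in final_pages:
--             final_pages.append(page)
--
--     return final_pages[:3]
-- ===== SOURCE B (Python) =====
-- def build_final_pages(reference_block: list[int], visual_page: int | None) -> list[int]:
--     """Fixed-register early-exit scan: keep at most three slots (a, b, c);
--     stop scanning as soon as the third distinct page is found.
--     No dedup structure is ever built, so long tails are never visited."""
--     a = b = c = 0
--     have = 0
--     if visual_page is not None:
--         a, have = visual_page, 1
--     for p in reference_block:
--         if have == 0:
--             a, have = p, 1
--         elif have == 1:
--             if p != a:
--                 b, have = p, 2
--         else:
--             if p != a and p != b: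
--                 c, have = p, 3
--                 break
--     return [a, b, c][:have]
-- ===== Notes on version B (the rewrite author's own statement) =====
-- stated objective: faster
-- what changed: A dedups the whole list into a growing output list (membership test against everything seen so far) and truncates at the end; B keeps only three fixed registers, scans once, and breaks out of the loop the moment the third distinct page is found, never building a dedup list and never visiting the tail.
import Mathlib
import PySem

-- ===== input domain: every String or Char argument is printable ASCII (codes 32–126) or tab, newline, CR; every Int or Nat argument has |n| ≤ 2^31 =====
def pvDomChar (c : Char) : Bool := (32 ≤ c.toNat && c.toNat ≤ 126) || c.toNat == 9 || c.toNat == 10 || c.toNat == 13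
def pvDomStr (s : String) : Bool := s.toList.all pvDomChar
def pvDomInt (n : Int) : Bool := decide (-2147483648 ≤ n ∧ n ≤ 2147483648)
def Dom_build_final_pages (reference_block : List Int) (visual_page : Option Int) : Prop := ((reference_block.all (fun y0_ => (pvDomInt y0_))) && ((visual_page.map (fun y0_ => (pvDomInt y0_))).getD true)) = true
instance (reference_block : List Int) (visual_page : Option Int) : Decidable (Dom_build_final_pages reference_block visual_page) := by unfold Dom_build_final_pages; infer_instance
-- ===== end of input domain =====

-- B replaces A's grow-a-dedup-list-then-truncate loop by a three-register scan that breaks at the third distinct page (faster: never builds the dedup list, stops early).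

-- ===== PORT A =====
-- final_pages = [] (+ visual_page); for page in reference_block: if page not in final_pages: append; return final_pages[:3]
def build_final_pages (reference_block : List Int) (visual_page : Option Int) : List Int :=
  let final_pages : List Int := match visual_page with | some v => [v] | none => []
  let final_pages := reference_block.foldl
    (fun acc page => if page ∈ acc then acc else acc ++ [page]) final_pages
  final_pages.take 3   -- final_pages[:3]: nonnegative literal bound, slice = take (exact)

-- ===== PORT B =====
-- the for-loop with break: state (a, b, c, have); returns the final state
def bfp_loop : List Int → Int → Int → Int → Nat → Int × Int × Int × Nat
  | [], a, b, c, h => (a, b, c, h)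
  | p :: rest, a, b, c, h =>
    if h = 0 then bfp_loop rest p b c 1
    else if h = 1 then
      (if p ≠ a then bfp_loop rest a p c 2 else bfp_loop rest a b c h)
    else
      (if p ≠ a ∧ p ≠ b then (a, b, p, 3)   -- break
       else bfp_loop rest a b c h)

def build_final_pages_alt (reference_block : List Int) (visual_page : Option Int) : List Int :=
  let s0 : Int × Nat := match visual_page with | some v => (v, 1) | none => (0, 0)
  let r := bfp_loop reference_block s0.1 0 0 s0.2
  ([r.1, r.2.1, r.2.2.1]).take r.2.2.2   -- return [a, b, c][:have]

-- ===== PRECONDITION & SPEC =====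
def Spec_build_final_pages (reference_block : List Int) (visual_page : Option Int) (out : List Int) : Prop := out = build_final_pages_alt reference_block visual_page
instance (reference_block : List Int) (visual_page : Option Int) (out : List Int) : Decidable (Spec_build_final_pages reference_block visual_page out) := by unfold Spec_build_final_pages; infer_instance

-- ===== CLAIM (what is proved, stated in full; the proofs are below) =====
def Claim_equal_build_final_pages : Prop := ∀ (reference_block : List Int) (visual_page : Option Int), Dom_build_final_pages reference_block visual_page → Spec_build_final_pages reference_block visual_page (build_final_pages reference_block visual_page)

-- ===== LEMMAS AND PROOFS =====

-- A's loop body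
def pvF (acc : List Int) (page : Int) : List Int := if page ∈ acc then acc else acc ++ [page]

-- "out" of B's loop state
def pvOut (r : Int × Int × Int × Nat) : List Int := ([r.1, r.2.1, r.2.2.1]).take r.2.2.2

-- once A's accumulator has ≥ 3 entries, its first three entries are frozen
theorem pv_take3_frozen (rb : List Int) (acc : List Int) (h : 3 ≤ acc.length) :
    (rb.foldl pvF acc).take 3 = acc.take 3 := by
  induction rb generalizing acc with
  | nil => rfl
  | cons p rest ih =>
      simp only [List.foldl_cons]
      by_cases hp : p ∈ acc
      · rw [show pvF acc p = acc by simp [pvF, hp]]; exact ih acc h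
      · have : pvF acc p = acc ++ [p] := by simp [pvF, hp]
        rw [this, ih _ (by simpa using Nat.le_succ_of_le h)]
        exact List.take_append_of_le_length h

theorem pv_state2 (rb : List Int) (a b c : Int) :
    (rb.foldl pvF [a, b]).take 3 = pvOut (bfp_loop rb a b c 2) := by
  induction rb generalizing c with
  | nil => simp [bfp_loop, pvOut]
  | cons p rest ih =>
      simp only [List.foldl_cons, bfp_loop]
      by_cases hp : p ≠ a ∧ p ≠ b
      · have hmem : p ∉ ([a, b] : List Int) := by simp [hp.1, hp.2]
        simp only [if_pos hp]
        rw [show pvF [a, b] p = [a, b, p] by simp [pvF, hmem]]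
        rw [pv_take3_frozen rest [a, b, p] (by simp)]
        simp [pvOut]
      · have hmem : p ∈ ([a, b] : List Int) := by
          rcases not_and_or.mp hp with h | h <;> simp [not_not.mp h]
        simp only [if_neg hp]
        rw [show pvF [a, b] p = [a, b] by simp [pvF, hmem]]
        exact ih c

theorem pv_state1 (rb : List Int) (a b c : Int) :
    (rb.foldl pvF [a]).take 3 = pvOut (bfp_loop rb a b c 1) := by
  induction rb generalizing b c with
  | nil => simp [bfp_loop, pvOut]
  | cons p rest ih =>
      simp only [List.foldl_cons, bfp_loop]
      by_cases hp : p ≠ a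
      · simp only [if_pos hp]
        rw [show pvF [a] p = [a, p] by simp [pvF, hp]]
        exact pv_state2 rest a p c
      · simp only [if_neg hp]
        rw [show pvF [a] p = [a] by simp [pvF, not_not.mp hp]]
        exact ih b c

theorem pv_state0 (rb : List Int) (a b c : Int) :
    (rb.foldl pvF []).take 3 = pvOut (bfp_loop rb a b c 0) := by
  cases rb with
  | nil => simp [bfp_loop, pvOut]
  | cons p rest =>
      simp only [List.foldl_cons, bfp_loop]
      rw [show pvF [] p = [p] by simp [pvF]]
      exact pv_state1 rest p b c

-- ===== VERDICT (by name: the statement is the Claim_ definition above) =====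
theorem build_final_pages_spec : Claim_equal_build_final_pages := by
  intro rb vp _
  unfold Spec_build_final_pages build_final_pages build_final_pages_alt
  cases vp with
  | none => exact pv_state0 rb 0 0 0
  | some v => exact pv_state1 rb v 0 0
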